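-- pv_equiv track=rewrite | github.com/danieljcheung/Pal | stats.py | detect_message_type
-- ===== SOURCE A (Python) =====
-- CORRECTION_PATTERNS = [
--     "no,", "no ", "actually", "that's wrong", "that's not right",
--     "not quite", "incorrect", "you're wrong", "thats wrong"
-- ]
--
-- EMOTIONAL_PATTERNS = [
--     "i feel", "i'm feeling", "i felt", "feeling", "sad", "happy",
--     "angry", "frustrated", "anxious", "worried", "scared", "excited",
--     "depressed", "stressed", "overwhelmed", "lonely", "hurt"
-- ]
--
-- REMINDER_PATTERNS = [
--     "remind me", "remember to", "don't let me forget", "make sure i"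
-- ]
--
-- THOUGHT_DUMP_PATTERNS = [
--     "i've been thinking", "on my mind", "i need to vent", "just thinking",
--     "random thought", "brain dump", "let me just"
-- ]
--
-- TASK_PATTERNS = [
--     "can you", "could you", "please", "i need you to", "help me"
-- ]
--
-- def detect_message_type(message: str) -> list[str]:
--     """Detect what types of content are in a message."""
--     message_lower = message.lower()
--     types = []
--
--     for pattern in CORRECTION_PATTERNS:
--         if pattern in message_lower:
--             types.append("correction")
--             break
--
--     for pattern in EMOTIONAL_PATTERNS:
--         if pattern in message_lower:
--             types.append("emotional_share")
--             break
--
--     for pattern in REMINDER_PATTERNS: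
--         if pattern in message_lower:
--             types.append("reminder_request")
--             break
--
--     for pattern in THOUGHT_DUMP_PATTERNS:
--         if pattern in message_lower:
--             types.append("thought_dump")
--             break
--
--     for pattern in TASK_PATTERNS:
--         if pattern in message_lower:
--             types.append("task_request")
--             break
--
--     # Check if it's likely an answer to a question (short, direct response)
--     if len(message.split()) <= 10 and not message.endswith("?"):
--         types.append("possible_answer")
--
--     return types
-- ===== SOURCE B (Python) =====
-- CORRECTION_PATTERNS = [
--     "no,", "no ", "actually", "that's wrong", "that's not right",
--     "not quite", "incorrect", "you're wrong", "thats wrong"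
-- ]
--
-- EMOTIONAL_PATTERNS = [
--     "i feel", "i'm feeling", "i felt", "feeling", "sad", "happy",
--     "angry", "frustrated", "anxious", "worried", "scared", "excited",
--     "depressed", "stressed", "overwhelmed", "lonely", "hurt"
-- ]
--
-- REMINDER_PATTERNS = [
--     "remind me", "remember to", "don't let me forget", "make sure i"
-- ]
--
-- THOUGHT_DUMP_PATTERNS = [
--     "i've been thinking", "on my mind", "i need to vent", "just thinking",
--     "random thought", "brain dump", "let me just"
-- ]
--
-- TASK_PATTERNS = [
--     "can you", "could you", "please", "i need you to", "help me"
-- ]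
--
-- # One flat inverted index: every pattern tagged with its label.
-- PATTERN_LABELS = (
--     [(p, "correction") for p in CORRECTION_PATTERNS]
--     + [(p, "emotional_share") for p in EMOTIONAL_PATTERNS]
--     + [(p, "reminder_request") for p in REMINDER_PATTERNS]
--     + [(p, "thought_dump") for p in THOUGHT_DUMP_PATTERNS]
--     + [(p, "task_request") for p in TASK_PATTERNS]
-- )
--
-- LABEL_ORDER = ["correction", "emotional_share", "reminder_request",
--                "thought_dump", "task_request"]
--
-- def detect_message_type(message: str) -> list[str]:
--     """Detect what types of content are in a message.
--
--     Single flat scan over all tagged patterns collecting the matched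
--     labels into a set, then emit the labels in canonical order.
--     """
--     message_lower = message.lower()
--     matched = set()
--     for pattern, label in PATTERN_LABELS:
--         if pattern in message_lower:
--             matched.add(label)
--     types = [label for label in LABEL_ORDER if label in matched]
--     if len(message.split()) <= 10 and not message.endswith("?"):
--         types.append("possible_answer")
--     return types
-- ===== Notes on version B (the rewrite author's own statement) =====
-- stated objective: alternative
-- what changed: Replaces five per-category break-loops appending labels directly with one flat scan over a tagged (pattern,label) inverted index that accumulates matched labels into a set, the ordered output then being rebuilt by filtering a canonical label-order list against that set; the final possible_answer guard is unchanged.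
import Mathlib
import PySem

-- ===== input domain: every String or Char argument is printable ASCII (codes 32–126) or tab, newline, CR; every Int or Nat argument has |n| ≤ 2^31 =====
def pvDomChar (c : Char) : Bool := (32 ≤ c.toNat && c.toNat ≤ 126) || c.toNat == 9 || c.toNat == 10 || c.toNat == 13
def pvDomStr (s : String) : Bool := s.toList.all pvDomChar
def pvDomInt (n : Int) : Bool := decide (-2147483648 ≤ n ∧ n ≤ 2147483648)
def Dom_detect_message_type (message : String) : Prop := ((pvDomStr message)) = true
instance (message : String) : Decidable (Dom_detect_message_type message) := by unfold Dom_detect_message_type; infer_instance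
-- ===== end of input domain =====

-- B replaces A's five per-category break-loops with one flat scan over a tagged (pattern,label) index that collects matched labels into a set, the ordered output rebuilt from a canonical label-order list (objective: alternative structure); same return value everywhere.

-- ===== PORT A =====
def pvCorrectionPatterns : List String :=
  ["no,", "no ", "actually", "that's wrong", "that's not right",
   "not quite", "incorrect", "you're wrong", "thats wrong"]
def pvEmotionalPatterns : List String :=
  ["i feel", "i'm feeling", "i felt", "feeling", "sad", "happy",
   "angry", "frustrated", "anxious", "worried", "scared", "excited",
   "depressed", "stressed", "overwhelmed", "lonely", "hurt"]
def pvReminderPatterns : List String :=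
  ["remind me", "remember to", "don't let me forget", "make sure i"]
def pvThoughtDumpPatterns : List String :=
  ["i've been thinking", "on my mind", "i need to vent", "just thinking",
   "random thought", "brain dump", "let me just"]
def pvTaskPatterns : List String :=
  ["can you", "could you", "please", "i need you to", "help me"]

-- A's 'for pattern in PATTERNS: if pattern in message_lower: types.append(label); break'
def pvBreakLoop (patterns : List String) (messageLower : String)
    (types : List String) (label : String) : List String :=
  match patterns with
  | [] => types
  | p :: rest =>
    if PySem.Str.isIn p messageLower then types ++ [label]
    else pvBreakLoop rest messageLower types label

def detect_message_type (message : String) : List String :=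
  let messageLower := PySem.Str.lower message
  let types : List String := []
  let types := pvBreakLoop pvCorrectionPatterns messageLower types "correction"
  let types := pvBreakLoop pvEmotionalPatterns messageLower types "emotional_share"
  let types := pvBreakLoop pvReminderPatterns messageLower types "reminder_request"
  let types := pvBreakLoop pvThoughtDumpPatterns messageLower types "thought_dump"
  let types := pvBreakLoop pvTaskPatterns messageLower types "task_request"
  if (PySem.Str.split₀ message).length ≤ 10 && !(PySem.Str.endswith message "?") then
    types ++ ["possible_answer"]
  else types

-- ===== PORT B =====
-- one flat inverted index: every pattern tagged with its label
def pvPatternLabels : List (String × String) :=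
  pvCorrectionPatterns.map (fun p => (p, "correction"))
  ++ pvEmotionalPatterns.map (fun p => (p, "emotional_share"))
  ++ pvReminderPatterns.map (fun p => (p, "reminder_request"))
  ++ pvThoughtDumpPatterns.map (fun p => (p, "thought_dump"))
  ++ pvTaskPatterns.map (fun p => (p, "task_request"))

def pvLabelOrder : List String :=
  ["correction", "emotional_share", "reminder_request", "thought_dump", "task_request"]

def detect_message_type_alt (message : String) : List String :=
  let messageLower := PySem.Str.lower message
  let matched : PySem.Set String :=
    pvPatternLabels.foldl
      (fun s pl => if PySem.Str.isIn pl.1 messageLower then PySem.Set.add s pl.2 else s)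
      PySem.Set.empty
  let types := pvLabelOrder.filter (fun label => PySem.Set.contains matched label)
  if (PySem.Str.split₀ message).length ≤ 10 && !(PySem.Str.endswith message "?") then
    types ++ ["possible_answer"]
  else types

-- ===== PRECONDITION & SPEC =====
def Spec_detect_message_type (message : String) (out : List String) : Prop := out = detect_message_type_alt message
instance (message : String) (out : List String) : Decidable (Spec_detect_message_type message out) := by unfold Spec_detect_message_type; infer_instance

-- ===== CLAIM (what is proved, stated in full; the proofs are below) =====
def Claim_equal_detect_message_type : Prop := ∀ (message : String), Dom_detect_message_type message → Spec_detect_message_type message (detect_message_type message)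

-- ===== LEMMAS AND PROOFS =====
-- A's break-loop appends the label iff some pattern matches.
theorem pvBreakLoop_eq (patterns : List String) (ml : String)
    (types : List String) (label : String) :
    pvBreakLoop patterns ml types label =
      if patterns.any (fun p => PySem.Str.isIn p ml) then types ++ [label] else types := by
  induction patterns with
  | nil => simp [pvBreakLoop]
  | cons p rest ih =>
    rw [pvBreakLoop, List.any_cons, ih]
    cases hc : PySem.Str.isIn p ml <;> simp

-- membership of a label in B's accumulated set of matched labels
theorem pvFold_contains (pairs : List (String × String)) (ml : String)
    (s : PySem.Set String) (lab : String) :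
    PySem.Set.contains
      (pairs.foldl
        (fun s pl => if PySem.Str.isIn pl.1 ml then PySem.Set.add s pl.2 else s) s) lab =
      (PySem.Set.contains s lab
        || pairs.any (fun pl => PySem.Str.isIn pl.1 ml && pl.2 == lab)) := by
  induction pairs generalizing s with
  | nil => simp
  | cons pl rest ih =>
    rw [List.foldl_cons, List.any_cons]
    by_cases hc : PySem.Str.isIn pl.1 ml = true
    · rw [if_pos hc, ih]
      have hb : (pl.2 == lab) = decide (lab = pl.2) := by
        by_cases he : lab = pl.2
        · simp [he]
        · simp [he, show ¬pl.2 = lab from fun h => he h.symm]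
      simp only [PySem.Set.add, PySem.Set.contains]
      by_cases hm : pl.2 ∈ s <;> by_cases he : lab = pl.2 <;>
        simp_all [Bool.or_left_comm]
    · rw [if_neg hc, ih]
      simp_all

-- the flat-index scan matches each label iff some pattern of that category matches
theorem pvContains_Correction (ml : String) :
    PySem.Set.contains
      (pvPatternLabels.foldl
        (fun s pl => if PySem.Str.isIn pl.1 ml then PySem.Set.add s pl.2 else s)
        PySem.Set.empty) "correction" =
      pvCorrectionPatterns.any (fun p => PySem.Str.isIn p ml) := by
  rw [pvFold_contains]
  simp [pvPatternLabels, pvCorrectionPatterns, pvEmotionalPatterns, pvReminderPatterns,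
        pvThoughtDumpPatterns, pvTaskPatterns, PySem.Set.empty]

theorem pvContains_Emotional (ml : String) :
    PySem.Set.contains
      (pvPatternLabels.foldl
        (fun s pl => if PySem.Str.isIn pl.1 ml then PySem.Set.add s pl.2 else s)
        PySem.Set.empty) "emotional_share" =
      pvEmotionalPatterns.any (fun p => PySem.Str.isIn p ml) := by
  rw [pvFold_contains]
  simp [pvPatternLabels, pvCorrectionPatterns, pvEmotionalPatterns, pvReminderPatterns,
        pvThoughtDumpPatterns, pvTaskPatterns, PySem.Set.empty]

theorem pvContains_Reminder (ml : String) :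
    PySem.Set.contains
      (pvPatternLabels.foldl
        (fun s pl => if PySem.Str.isIn pl.1 ml then PySem.Set.add s pl.2 else s)
        PySem.Set.empty) "reminder_request" =
      pvReminderPatterns.any (fun p => PySem.Str.isIn p ml) := by
  rw [pvFold_contains]
  simp [pvPatternLabels, pvCorrectionPatterns, pvEmotionalPatterns, pvReminderPatterns,
        pvThoughtDumpPatterns, pvTaskPatterns, PySem.Set.empty]

theorem pvContains_ThoughtDump (ml : String) :
    PySem.Set.contains
      (pvPatternLabels.foldl
        (fun s pl => if PySem.Str.isIn pl.1 ml then PySem.Set.add s pl.2 else s)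
        PySem.Set.empty) "thought_dump" =
      pvThoughtDumpPatterns.any (fun p => PySem.Str.isIn p ml) := by
  rw [pvFold_contains]
  simp [pvPatternLabels, pvCorrectionPatterns, pvEmotionalPatterns, pvReminderPatterns,
        pvThoughtDumpPatterns, pvTaskPatterns, PySem.Set.empty]

theorem pvContains_Task (ml : String) :
    PySem.Set.contains
      (pvPatternLabels.foldl
        (fun s pl => if PySem.Str.isIn pl.1 ml then PySem.Set.add s pl.2 else s)
        PySem.Set.empty) "task_request" =
      pvTaskPatterns.any (fun p => PySem.Str.isIn p ml) := by
  rw [pvFold_contains]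
  simp [pvPatternLabels, pvCorrectionPatterns, pvEmotionalPatterns, pvReminderPatterns,
        pvThoughtDumpPatterns, pvTaskPatterns, PySem.Set.empty]

-- ===== VERDICT (by name: the statement is the Claim_ definition above) =====
theorem detect_message_type_spec : Claim_equal_detect_message_type := by
  intro message _
  unfold Spec_detect_message_type detect_message_type detect_message_type_alt
  simp only [pvLabelOrder, List.filter_cons, List.filter_nil, pvBreakLoop_eq,
             pvContains_Correction, pvContains_Emotional, pvContains_Reminder,
             pvContains_ThoughtDump, pvContains_Task]
  cases h1 : pvCorrectionPatterns.any (fun p => PySem.Str.isIn p (PySem.Str.lower message)) <;>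
  cases h2 : pvEmotionalPatterns.any (fun p => PySem.Str.isIn p (PySem.Str.lower message)) <;>
  cases h3 : pvReminderPatterns.any (fun p => PySem.Str.isIn p (PySem.Str.lower message)) <;>
  cases h4 : pvThoughtDumpPatterns.any (fun p => PySem.Str.isIn p (PySem.Str.lower message)) <;>
  cases h5 : pvTaskPatterns.any (fun p => PySem.Str.isIn p (PySem.Str.lower message)) <;>
    simp
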